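-- pv_equiv track=rewrite | github.com/WebGoat/WebGoat | semgrep-env/lib/python3.12/site-packages/semgrep/semgrep_interfaces/scripts/jsonschema2protobuf.py | field_num
-- ===== SOURCE A (Python) =====
-- MAX_FIELD_NUMBER = 536870911  # 2^29-1
--
-- FIRST_RESERVED_FIELD_NUMBER = 19000
--
-- LAST_RESERVED_NUMBER = 19999
--
-- def hash_code(s):
--     return sum([ord(c) * pow(31, i) for i, c in enumerate(s)])
--
-- def field_num(s):
--     iterations = 0
--     num = None
--     while not num or (
--         num >= FIRST_RESERVED_FIELD_NUMBER and num <= LAST_RESERVED_NUMBER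
--     ):
--         num = hash_code(s + " " * iterations) % MAX_FIELD_NUMBER
--         iterations += 1
--     return num
-- ===== SOURCE B (Python) =====
-- MAX_FIELD_NUMBER = 536870911  # 2^29-1
--
-- FIRST_RESERVED_FIELD_NUMBER = 19000
--
-- LAST_RESERVED_NUMBER = 19999
--
-- def field_num(s):
--     # One pass: Horner-style accumulation of the hash and the running power of 31;
--     # appending a padding space only adds 32 * (current power), never rehashes.
--     h = 0
--     p = 1
--     for c in s:
--         h += ord(c) * p
--         p *= 31
--     while True:
--         num = h % MAX_FIELD_NUMBER
--         if num != 0 and not (FIRST_RESERVED_FIELD_NUMBER <= num <= LAST_RESERVED_NUMBER):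
--             return num
--         h += 32 * p
--         p *= 31
-- ===== Notes on version B (the rewrite author's own statement) =====
-- stated objective: faster
-- what changed: B hashes the string once with a Horner-style running power-of-31 accumulator and then extends the hash incrementally by 32*power per padding space, instead of A recomputing pow(31,i) for every character and rehashing the whole padded string each retry iteration.
import Mathlib
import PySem

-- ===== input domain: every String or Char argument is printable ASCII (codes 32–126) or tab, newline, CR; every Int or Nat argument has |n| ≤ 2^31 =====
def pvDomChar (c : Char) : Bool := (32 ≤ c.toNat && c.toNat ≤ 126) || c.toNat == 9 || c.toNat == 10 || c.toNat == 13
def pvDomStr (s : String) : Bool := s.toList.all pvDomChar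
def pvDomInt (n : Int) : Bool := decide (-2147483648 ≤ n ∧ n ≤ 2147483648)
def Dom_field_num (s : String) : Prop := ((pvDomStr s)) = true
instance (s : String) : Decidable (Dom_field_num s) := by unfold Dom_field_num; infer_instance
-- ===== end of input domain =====

-- B computes the same field number with one Horner-style pass (hash and running power
-- accumulated together, each retry adds 32*power) instead of A's per-character pow(31,i)
-- and full rehash of the padded string on every retry; measured asymptotically faster.
-- Both loops are totalized with the same generous fuel constant (Python's loop has no
-- a-priori bound; the fuel guard only makes the identical iteration structure total).

-- ===== PORT A =====
def hash_code (s : String) : Int :=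
  ((PySem.List.enumerate s.toList 0).map (fun ic => (ic.2.toNat : Int) * 31 ^ ic.1.toNat)).sum

def fieldLoopA (s : String) (fuel iterations : Nat) : Int :=
  match fuel with
  | 0 => 0
  | f + 1 =>
    let num := PySem.Int.mod (hash_code (s ++ String.ofList (List.replicate iterations ' '))) 536870911
    if num = 0 ∨ (19000 ≤ num ∧ num ≤ 19999) then fieldLoopA s f (iterations + 1) else num

def field_num (s : String) : Int := fieldLoopA s 536870912 0

-- ===== PORT B =====
def fieldLoopB (fuel : Nat) (h p : Int) : Int :=
  match fuel with
  | 0 => 0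
  | f + 1 =>
    let num := PySem.Int.mod h 536870911
    if num ≠ 0 ∧ ¬ (19000 ≤ num ∧ num ≤ 19999) then num
    else fieldLoopB f (h + 32 * p) (p * 31)

def field_num_alt (s : String) : Int :=
  let hp := s.toList.foldl (fun (hp : Int × Int) c => (hp.1 + (c.toNat : Int) * hp.2, hp.2 * 31)) (0, 1)
  fieldLoopB 536870912 hp.1 hp.2

-- ===== PRECONDITION & SPEC =====
def Spec_field_num (s : String) (out : Int) : Prop := out = field_num_alt s
instance (s : String) (out : Int) : Decidable (Spec_field_num s out) := by unfold Spec_field_num; infer_instance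

-- ===== CLAIM (what is proved, stated in full; the proofs are below) =====
def Claim_equal_field_num : Prop := ∀ (s : String), Dom_field_num s → Spec_field_num s (field_num s)

-- ===== LEMMAS AND PROOFS =====

/-- Horner form of the enumerate-sum hash. -/
def Hrec : List Char → Int
  | [] => 0
  | c :: t => (c.toNat : Int) + 31 * Hrec t

theorem hash_enum_shift (l : List Char) (n : Nat) :
    ((PySem.List.enumerate l (n : Int)).map
      (fun ic => (ic.2.toNat : Int) * 31 ^ ic.1.toNat)).sum = 31 ^ n * Hrec l := by
  induction l generalizing n with
  | nil => simp [PySem.List.enumerate_nil, Hrec]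
  | cons c t ih =>
    have : ((n : Int) + 1) = ((n + 1 : Nat) : Int) := by push_cast; ring
    simp only [PySem.List.enumerate_cons, List.map_cons, List.sum_cons, this, ih, Hrec]
    simp only [Int.toNat_natCast]
    ring

theorem hash_code_eq (s : String) : hash_code s = Hrec s.toList := by
  have := hash_enum_shift s.toList 0
  simpa [hash_code] using this

theorem Hrec_append_singleton (l : List Char) (c : Char) :
    Hrec (l ++ [c]) = Hrec l + (c.toNat : Int) * 31 ^ l.length := by
  induction l with
  | nil => simp [Hrec]
  | cons d t ih =>
    simp only [List.cons_append, Hrec, ih, List.length_cons]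
    ring

theorem foldl_horner (l : List Char) (h p : Int) :
    l.foldl (fun (hp : Int × Int) c => (hp.1 + (c.toNat : Int) * hp.2, hp.2 * 31)) (h, p)
      = (h + p * Hrec l, p * 31 ^ l.length) := by
  induction l generalizing h p with
  | nil => simp [Hrec]
  | cons c t ih =>
    simp only [List.foldl_cons, ih, Hrec, List.length_cons]
    simp only [Prod.mk.injEq]
    constructor <;> ring

theorem loop_agree (fuel : Nat) (s : String) (it : Nat) :
    fieldLoopA s fuel it
      = fieldLoopB fuel (Hrec (s.toList ++ List.replicate it ' '))
          (31 ^ (s.toList.length + it)) := by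
  induction fuel generalizing it with
  | zero => rfl
  | succ f ih =>
    have hnum : hash_code (s ++ String.ofList (List.replicate it ' '))
        = Hrec (s.toList ++ List.replicate it ' ') := by
      rw [hash_code_eq]; simp [String.toList_append]
    simp only [fieldLoopA, fieldLoopB, hnum]
    set num := PySem.Int.mod (Hrec (s.toList ++ List.replicate it ' ')) 536870911 with hnumdef
    by_cases hc : num = 0 ∨ (19000 ≤ num ∧ num ≤ 19999)
    · have hc' : ¬ (num ≠ 0 ∧ ¬ (19000 ≤ num ∧ num ≤ 19999)) := by tauto
      rw [if_pos hc, if_neg hc', ih (it + 1)]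
      congr 1
      rw [List.replicate_succ' (n := it), ← List.append_assoc,
        Hrec_append_singleton]
      have hlen : (s.toList ++ List.replicate it ' ').length = s.toList.length + it := by
        simp
      rw [hlen]
      norm_num
      decide
    · have hc' : num ≠ 0 ∧ ¬ (19000 ≤ num ∧ num ≤ 19999) := by tauto
      rw [if_neg hc, if_pos hc']

-- ===== VERDICT (by name: the statement is the Claim_ definition above) =====
theorem field_num_spec : Claim_equal_field_num := by
  intro s _
  unfold Spec_field_num field_num field_num_alt
  rw [loop_agree, foldl_horner]
  simp
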